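-- pv_equiv track=rewrite | github.com/MrBrantCode/unitest_baseline | mut_generate/mist_train_cf/cf_101476/solution.py | sort_by_vowel_frequency
-- ===== SOURCE A (Python) =====
-- def sort_by_vowel_frequency(word_list):
--     vowels = ['e', 'o']
--     filtered_list = [word for word in word_list if 'x' not in word]
--     frequency_dict = {}
--     for word in filtered_list:
--         frequency = sum([word.count(vowel) for vowel in vowels])
--         if frequency not in frequency_dict:
--             frequency_dict[frequency] = [word]
--         else:
--             frequency_dict[frequency].append(word)
--     sorted_list = []
--     for frequency in sorted(frequency_dict.keys(), reverse=True):
--         sorted_list.extend(sorted(frequency_dict[frequency]))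
--     return sorted_list
-- ===== SOURCE B (Python) =====
-- def sort_by_vowel_frequency(word_list):
--     filtered = [w for w in word_list if 'x' not in w]
--     return sorted(filtered, key=lambda w: (-(w.count('e') + w.count('o')), w))
-- ===== Notes on version B (the rewrite author's own statement) =====
-- stated objective: simpler
-- what changed: Replaced the frequency-dict grouping plus per-bucket sorting with a single comparator sort of the filtered list on the tuple key (-vowel_count, word).
import Mathlib
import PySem

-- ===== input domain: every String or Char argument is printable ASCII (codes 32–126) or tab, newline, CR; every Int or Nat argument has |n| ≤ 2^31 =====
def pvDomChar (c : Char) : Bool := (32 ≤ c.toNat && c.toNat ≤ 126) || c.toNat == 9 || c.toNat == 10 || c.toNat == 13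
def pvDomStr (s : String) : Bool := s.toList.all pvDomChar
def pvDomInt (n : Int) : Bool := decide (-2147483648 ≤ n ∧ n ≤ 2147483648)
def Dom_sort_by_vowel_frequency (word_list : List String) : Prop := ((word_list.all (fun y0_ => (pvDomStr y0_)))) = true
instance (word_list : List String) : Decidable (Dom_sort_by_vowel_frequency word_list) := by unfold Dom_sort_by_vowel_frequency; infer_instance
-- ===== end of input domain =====

-- B replaces A's frequency-dict grouping + per-bucket sort by one comparator sort of the
-- filtered list on the tuple key (-vowel_count, word): simpler, same behaviour.


-- ===== PORT A =====
def sort_by_vowel_frequency (word_list : List String) : List String :=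
  let vowels : List String := ["e", "o"]
  let filtered_list := word_list.filter (fun word => !PySem.Str.isIn "x" word)
  let frequency_dict : PySem.Dict Int (List String) :=
    filtered_list.foldl (fun d word =>
      let frequency : Int := (vowels.map (fun vowel => (PySem.Str.count word vowel : Int))).sum
      if !d.contains frequency then d.insert frequency [word]
      else d.modify frequency [] (fun b => b ++ [word])) PySem.Dict.empty
  let sorted_list :=
    (PySem.List.sorted frequency_dict.keys (fun k => k) true).foldl
      (fun acc frequency =>
        acc ++ PySem.List.sorted (frequency_dict.getD frequency []) (fun w => w) false) []
  sorted_list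

-- ===== PORT B =====
def sort_by_vowel_frequency_alt (word_list : List String) : List String :=
  let filtered := word_list.filter (fun word => !PySem.Str.isIn "x" word)
  PySem.List.sorted2 filtered
    (fun w => -((PySem.Str.count w "e" : Int) + (PySem.Str.count w "o" : Int)))
    (fun w => w) false

-- ===== PRECONDITION & SPEC =====
def Spec_sort_by_vowel_frequency (word_list : List String) (out : List String) : Prop := out = sort_by_vowel_frequency_alt word_list
instance (word_list : List String) (out : List String) : Decidable (Spec_sort_by_vowel_frequency word_list out) := by unfold Spec_sort_by_vowel_frequency; infer_instance

-- ===== CLAIM (what is proved, stated in full; the proofs are below) =====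
def Claim_equal_sort_by_vowel_frequency : Prop := ∀ (word_list : List String), Dom_sort_by_vowel_frequency word_list → Spec_sort_by_vowel_frequency word_list (sort_by_vowel_frequency word_list)

-- ===== LEMMAS AND PROOFS =====

-- vowel frequency of a word, as both ports compute it
def pvF (w : String) : Int := (PySem.Str.count w "e" : Int) + (PySem.Str.count w "o" : Int)

-- the boolean strict comparison sorted2 uses on the key (-pvF w, w)
def pvLt (a b : String) : Bool :=
  decide ((-pvF a) < -pvF b) || (!decide ((-pvF b) < -pvF a) && decide (a < b))

lemma pvLt_iff (a b : String) :
    pvLt a b = true ↔ (pvF b < pvF a ∨ (pvF b = pvF a ∧ a < b)) := by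
  simp only [pvLt, Bool.or_eq_true, Bool.and_eq_true, Bool.not_eq_true',
    decide_eq_true_eq, decide_eq_false_iff_not, neg_lt_neg_iff]
  constructor
  · rintro (h | ⟨h1, h2⟩)
    · exact Or.inl h
    · rcases lt_trichotomy (pvF a) (pvF b) with h3 | h3 | h3
      · exact absurd h3 h1
      · exact Or.inr ⟨h3.symm, h2⟩
      · exact Or.inl h3
  · rintro (h | ⟨h1, h2⟩)
    · exact Or.inl h
    · exact Or.inr ⟨by omega, h2⟩

lemma pvLt_false_iff (a b : String) :
    pvLt a b = false ↔ (pvF a < pvF b ∨ (pvF a = pvF b ∧ b ≤ a)) := by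
  rw [show (pvLt a b = false) ↔ ¬ (pvLt a b = true) by simp, pvLt_iff]
  constructor
  · intro h
    rcases lt_trichotomy (pvF a) (pvF b) with h1 | h1 | h1
    · exact Or.inl h1
    · exact Or.inr ⟨h1, not_lt.mp (fun hab => h (Or.inr ⟨h1.symm, hab⟩))⟩
    · exact absurd (Or.inl h1) h
  · rintro (h1 | ⟨h1, h2⟩) (h3 | ⟨h3, h4⟩) <;>
      first | omega | exact absurd h4 (not_lt.mpr h2)

lemma pvLt_asymm (a b : String) (h : pvLt a b = true) : pvLt b a = false := by
  rw [pvLt_iff] at h; rw [pvLt_false_iff]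
  rcases h with h | ⟨h1, h2⟩
  · exact Or.inl h
  · exact Or.inr ⟨h1, le_of_lt h2⟩

lemma pvLt_negtrans (a b c : String) (h1 : pvLt a b = true) (h2 : pvLt c b = false) :
    pvLt c a = false := by
  rw [pvLt_iff] at h1; rw [pvLt_false_iff] at h2 ⊢
  rcases h1 with h1 | ⟨h1a, h1b⟩ <;> rcases h2 with h2 | ⟨h2a, h2b⟩
  · exact Or.inl (by omega)
  · exact Or.inl (by omega)
  · exact Or.inl (by omega)
  · exact Or.inr ⟨by omega, le_of_lt (lt_of_lt_of_le h1b h2b)⟩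

lemma pvLt_antisymm (a b : String) (h1 : pvLt b a = false) (h2 : pvLt a b = false) :
    a = b := by
  rw [pvLt_false_iff] at h1 h2
  rcases h1 with h1 | ⟨h1a, h1b⟩ <;> rcases h2 with h2 | ⟨h2a, h2b⟩ <;>
    first | omega | exact le_antisymm h1b h2b

-- the relation both outputs are Pairwise-ordered by
lemma pv_insertBy_pairwise (x : String) :
    ∀ (ys : List String), ys.Pairwise (fun a b => pvLt b a = false) →
      (PySem.List.insertBy pvLt x ys).Pairwise (fun a b => pvLt b a = false) := by
  intro ys
  induction ys with
  | nil => intro _; simp [PySem.List.insertBy]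
  | cons y ys ih =>
    intro hp
    rw [List.pairwise_cons] at hp
    obtain ⟨hy, htail⟩ := hp
    by_cases h : pvLt x y = true
    · simp only [PySem.List.insertBy, h, if_true]
      refine List.Pairwise.cons ?_ (List.Pairwise.cons hy htail)
      intro z hz
      rcases List.mem_cons.mp hz with rfl | hz
      · exact pvLt_asymm x z h
      · exact pvLt_negtrans x y z h (hy z hz)
    · rw [Bool.not_eq_true] at h
      simp only [PySem.List.insertBy, h]
      refine List.Pairwise.cons ?_ (ih htail)
      intro z hz
      rcases (PySem.List.mem_insertBy pvLt x z ys).mp hz with rfl | hz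
      · exact h
      · exact hy z hz

lemma pv_foldl_insertBy_pairwise :
    ∀ (xs acc : List String), acc.Pairwise (fun a b => pvLt b a = false) →
      (xs.foldl (fun acc x => PySem.List.insertBy pvLt x acc) acc).Pairwise
        (fun a b => pvLt b a = false) := by
  intro xs
  induction xs with
  | nil => intro acc h; simpa using h
  | cons x xs ih => intro acc h; exact ih _ (pv_insertBy_pairwise x acc h)

lemma pv_sorted2_eq (l : List String) :
    PySem.List.sorted2 l
      (fun w => -((PySem.Str.count w "e" : Int) + (PySem.Str.count w "o" : Int)))
      (fun w => w) false
      = l.foldl (fun acc x => PySem.List.insertBy pvLt x acc) [] := rfl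

-- A's grouping loop step is exactly a `modify … (· ++ [word])` step
lemma pv_step_eq (d : PySem.Dict Int (List String)) (k : Int) (w : String) :
    (if !d.contains k then d.insert k [w] else d.modify k [] (fun b => b ++ [w]))
      = d.modify k [] (fun b => b ++ [w]) := by
  by_cases hc : d.contains k = true
  · simp [hc]
  · rw [Bool.not_eq_true] at hc
    simp [hc, PySem.Dict.modify, PySem.Dict.getD_of_not_contains d ([] : List String) hc]

lemma pv_freq_eq (w : String) :
    ((["e", "o"] : List String).map (fun vowel => (PySem.Str.count w vowel : Int))).sum
      = pvF w := by
  simp [pvF]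

-- a Nodup list of keys covering every key of l: flatMap of the buckets is a permutation of l
lemma pv_flatMap_filter_perm :
    ∀ (ks : List Int) (l : List String), ks.Nodup → (∀ w ∈ l, pvF w ∈ ks) →
      (ks.flatMap (fun k => l.filter (fun w => pvF w == k))).Perm l := by
  intro ks
  induction ks with
  | nil =>
    intro l _ hcov
    have : l = [] := List.eq_nil_iff_forall_not_mem.mpr
      (fun w hw => by simpa using hcov w hw)
    subst this; simp
  | cons k ks ih =>
    intro l hnd hcov
    rw [List.nodup_cons] at hnd
    rw [List.flatMap_cons]
    have hrw : ∀ k' ∈ ks,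
        l.filter (fun w => pvF w == k')
          = (l.filter (fun w => !(pvF w == k))).filter (fun w => pvF w == k') := by
      intro k' hk'
      rw [List.filter_filter]
      apply List.filter_congr
      intro a _
      by_cases hfa : pvF a = k'
      · have hne : k' ≠ k := fun h => hnd.1 (h ▸ hk')
        simp [hfa, hne]
      · simp [hfa]
    have hmapeq : ks.flatMap (fun k' => l.filter (fun w => pvF w == k'))
        = ks.flatMap (fun k' => (l.filter (fun w => !(pvF w == k))).filter
            (fun w => pvF w == k')) := by
      simp only [List.flatMap_def]
      exact congrArg List.flatten (List.map_congr_left hrw)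
    rw [hmapeq]
    have hsub : (ks.flatMap (fun k' => (l.filter (fun w => !(pvF w == k))).filter
        (fun w => pvF w == k'))).Perm (l.filter (fun w => !(pvF w == k))) := by
      apply ih _ hnd.2
      intro w hw
      rw [List.mem_filter] at hw
      have h1 := hcov w hw.1
      have h2 : pvF w ≠ k := by simpa using hw.2
      rcases List.mem_cons.mp h1 with h | h
      · exact absurd h h2
      · exact h
    exact (List.Perm.append (List.Perm.refl _) hsub).trans
      (List.filter_append_perm (fun w => pvF w == k) l)

lemma pv_flatMap_sorted_perm (ks : List Int) (g : Int → List String) :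
    (ks.flatMap (fun f => PySem.List.sorted (g f) (fun w => w) false)).Perm
      (ks.flatMap g) := by
  induction ks with
  | nil => simp
  | cons k ks ih =>
    rw [List.flatMap_cons, List.flatMap_cons]
    exact List.Perm.append (PySem.List.sorted_perm (g k) (fun w => w) false) ih

-- A's result, rewritten from the dict to descending distinct frequencies of sorted buckets
lemma pv_A_eq (wl : List String) :
    sort_by_vowel_frequency wl
      = (PySem.List.sorted (PySem.Set.ofList ((wl.filter (fun word => !PySem.Str.isIn "x" word)).map pvF) : List Int) (fun k => k) true).flatMap
          (fun f => PySem.List.sorted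
            ((wl.filter (fun word => !PySem.Str.isIn "x" word)).filter (fun w => pvF w == f))
            (fun w => w) false) := by
  have hF : ∀ l : List String,
      (l.foldl (fun d word =>
        let frequency : Int := ((["e", "o"] : List String).map (fun vowel => (PySem.Str.count word vowel : Int))).sum
        if !d.contains frequency then d.insert frequency [word]
        else d.modify frequency [] (fun b => b ++ [word])) PySem.Dict.empty)
      = l.foldl (fun d word => d.modify (pvF word) [] (fun b => b ++ [word])) PySem.Dict.empty := by
    intro l
    congr 1
    funext d word
    rw [show ((["e", "o"] : List String).map (fun vowel => (PySem.Str.count word vowel : Int))).sum = pvF word from pv_freq_eq word]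
    exact pv_step_eq d (pvF word) word
  simp only [sort_by_vowel_frequency]
  rw [hF]
  set F := wl.filter (fun word => !PySem.Str.isIn "x" word) with hFdef
  have hkeys : (F.foldl (fun d word => d.modify (pvF word) [] (fun b => b ++ [word]))
      PySem.Dict.empty).keys = PySem.Set.ofList (F.map pvF) := by
    rw [PySem.Dict.keys_foldl_modify_key F pvF [] (fun _ word => fun b => b ++ [word])
      PySem.Dict.empty]
    rw [PySem.Dict.keys_empty, PySem.Set.update_nil_left]
  have hgetD : ∀ f : Int,
      (F.foldl (fun d word => d.modify (pvF word) [] (fun b => b ++ [word]))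
        PySem.Dict.empty).getD f [] = F.filter (fun w => pvF w == f) := by
    intro f
    have h1 : F.foldl (fun d word => d.modify (pvF word) [] (fun b => b ++ [word]))
        PySem.Dict.empty
        = (F.map (fun w => ((pvF w : Int), w))).foldl
            (fun d p => d.modify p.1 [] (fun b => b ++ [p.2])) PySem.Dict.empty := by
      rw [List.foldl_map]
    rw [h1, PySem.Dict.getD_foldl_modify_append, PySem.Dict.getD_empty, List.nil_append,
      List.filter_map]
    simp [Function.comp_def]
  rw [PySem.List.foldl_append_eq_flatMap, List.nil_append, hkeys]
  congr 1
  funext f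
  rw [hgetD]

-- the concatenation of sorted buckets over strictly descending frequencies is Pairwise-ordered
lemma pv_A_pairwise (F : List String) (ks : List Int)
    (hks : ks.Pairwise (fun a b => b < a)) :
    (ks.flatMap (fun f => PySem.List.sorted (F.filter (fun w => pvF w == f))
      (fun w => w) false)).Pairwise (fun a b => pvLt b a = false) := by
  rw [List.pairwise_flatMap]
  constructor
  · intro f _
    have hmem : ∀ w ∈ PySem.List.sorted (F.filter (fun w => pvF w == f)) (fun w => w) false,
        pvF w = f := by
      intro w hw
      rw [PySem.List.mem_sorted] at hw
      rw [List.mem_filter] at hw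
      simpa using hw.2
    have hsorted := PySem.List.sorted_pairwise (F.filter (fun w => pvF w == f)) (fun w => w)
    refine hsorted.imp_of_mem ?_
    intro a b ha hb hab
    rw [pvLt_false_iff]
    exact Or.inr ⟨(hmem b hb).trans (hmem a ha).symm, hab⟩
  · refine hks.imp_of_mem ?_
    intro f1 f2 _ _ hlt x hx y hy
    rw [PySem.List.mem_sorted, List.mem_filter] at hx hy
    have hx2 : pvF x = f1 := by simpa using hx.2
    have hy2 : pvF y = f2 := by simpa using hy.2
    rw [pvLt_false_iff]
    exact Or.inl (by omega)

lemma pv_main (wl : List String) :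
    sort_by_vowel_frequency wl = sort_by_vowel_frequency_alt wl := by
  set F := wl.filter (fun word => !PySem.Str.isIn "x" word) with hFdef
  set ks := (PySem.List.sorted (PySem.Set.ofList (F.map pvF) : List Int) (fun k => k) true)
    with hksdef
  have hksperm : ks.Perm (PySem.Set.ofList (F.map pvF) : List Int) :=
    PySem.List.sorted_perm _ _ _
  have hksnodup : ks.Nodup := hksperm.symm.nodup (PySem.Set.nodup_ofList _)
  have hksdesc : ks.Pairwise (fun a b => b < a) := by
    have h1 : ks.Pairwise (fun a b : Int => b ≤ a) := by
      simpa using PySem.List.sorted_pairwise_rev (PySem.Set.ofList (F.map pvF) : List Int)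
        (fun k => k)
    refine (h1.and hksnodup).imp ?_
    rintro a b ⟨hle, hne⟩
    exact lt_of_le_of_ne hle (fun h => hne h.symm)
  have hAeq := pv_A_eq wl
  rw [← hFdef, ← hksdef] at hAeq
  have hAperm : (sort_by_vowel_frequency wl).Perm F := by
    rw [hAeq]
    refine (pv_flatMap_sorted_perm ks (fun f => F.filter (fun w => pvF w == f))).trans ?_
    apply pv_flatMap_filter_perm ks F hksnodup
    intro w hw
    rw [hksperm.mem_iff, PySem.Set.mem_ofList]
    exact List.mem_map.mpr ⟨w, hw, rfl⟩
  have hAsorted : (sort_by_vowel_frequency wl).Pairwise (fun a b => pvLt b a = false) := by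
    rw [hAeq]; exact pv_A_pairwise F ks hksdesc
  have hBeq : sort_by_vowel_frequency_alt wl
      = F.foldl (fun acc x => PySem.List.insertBy pvLt x acc) [] := by
    simp only [sort_by_vowel_frequency_alt]
    rw [← hFdef, pv_sorted2_eq]
  have hBperm : (sort_by_vowel_frequency_alt wl).Perm F := by
    simp only [sort_by_vowel_frequency_alt]
    rw [← hFdef]
    exact PySem.List.sorted2_perm F _ _ false
  have hBsorted : (sort_by_vowel_frequency_alt wl).Pairwise (fun a b => pvLt b a = false) := by
    rw [hBeq]
    exact pv_foldl_insertBy_pairwise F [] (List.Pairwise.nil)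
  exact List.Perm.eq_of_pairwise
    (fun a b _ _ h1 h2 => pvLt_antisymm a b h1 h2)
    hAsorted hBsorted (hAperm.trans hBperm.symm)

-- ===== VERDICT (by name: the statement is the Claim_ definition above) =====
theorem sort_by_vowel_frequency_spec : Claim_equal_sort_by_vowel_frequency := by
  intro wl _
  unfold Spec_sort_by_vowel_frequency
  exact pv_main wl
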